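-- pv_equiv track=rewrite | github.com/maxkashyap41/pythonDSA | Array/Type_of _Array.py | typeArray
-- ===== SOURCE A (Python) =====
-- def typeArray(arr, n):
--     sortArr = sorted(arr)
--
--     maxN = max(arr)
--     minN = min(arr)
--     if maxN == arr[n-1] and minN == arr[0]:
--         return maxN, 1
--     elif maxN == arr[0] and minN == arr[n-1]:
--         return maxN, 2
--     else:
--         if arr[0] == sortArr[-2]:
--             return maxN, 3
--         else:
--             for i in range(n-1):
--                 if arr[i] == maxN:
--                     if arr[i+1] == sortArr[-2]:
--                         return maxN, 3
--                     elif arr[i+1] == minN: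
--                         return maxN, 4
-- ===== SOURCE B (Python) =====
-- def typeArray(arr, n):
--     # One fold tracking min, max and second-largest (with multiplicity) instead of sorting.
--     mn = mx = second = None
--     for v in arr:
--         if mn is None or v < mn:
--             mn = v
--         if mx is None or v >= mx:
--             mx, second = v, mx
--         elif second is None or v > second:
--             second = v
--     first, last = arr[0], arr[n - 1]
--     if mx == last and mn == first:
--         return mx, 1
--     if mx == first and mn == last:
--         return mx, 2
--     if first == second:
--         return mx, 3
--     prev = first
--     for i in range(1, n):
--         cur = arr[i]
--         if prev == mx:
--             if cur == second:
--                 return mx, 3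
--             if cur == mn:
--                 return mx, 4
--         prev = cur
--     return None
-- ===== Notes on version B (the rewrite author's own statement) =====
-- stated objective: alternative
-- what changed: Replaces the full sort (used only to read the second-largest element) by a single fold that tracks min, max and second-largest-with-multiplicity, and walks adjacent pairs with a prev/cur scan.
import Mathlib
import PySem

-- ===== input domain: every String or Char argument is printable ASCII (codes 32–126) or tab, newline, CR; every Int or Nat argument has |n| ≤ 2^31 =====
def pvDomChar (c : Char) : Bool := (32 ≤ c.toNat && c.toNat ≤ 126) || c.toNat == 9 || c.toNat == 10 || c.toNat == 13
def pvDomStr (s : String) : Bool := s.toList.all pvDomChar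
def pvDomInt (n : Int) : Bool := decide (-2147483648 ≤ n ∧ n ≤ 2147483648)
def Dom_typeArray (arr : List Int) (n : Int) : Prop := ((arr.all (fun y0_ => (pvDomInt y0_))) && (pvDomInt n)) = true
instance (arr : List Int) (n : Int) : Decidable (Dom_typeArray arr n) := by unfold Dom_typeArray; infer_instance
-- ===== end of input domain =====

-- B replaces A's full sort (read only at its second-to-last slot) by one fold tracking
-- min / max / second-largest-with-multiplicity, and a prev/cur scan of adjacent pairs (objective: alternative).

-- ===== PORT A =====
-- the 'for i in range(n-1)' search with its early returns
def typeArrayLoop (arr : List Int) (maxN minN sec2 : Int) : List Int → Option (Int × Int)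
  | [] => none
  | i :: rest =>
    match PySem.List.pyGet? arr i, PySem.List.pyGet? arr (i + 1) with
    | some ai, some ai1 =>
      if ai = maxN then
        if ai1 = sec2 then some (maxN, 3)
        else if ai1 = minN then some (maxN, 4)
        else typeArrayLoop arr maxN minN sec2 rest
      else typeArrayLoop arr maxN minN sec2 rest
    | _, _ => none

-- (Python's 'sortArr = sorted(arr)' is inlined at its single use site, sortArr[-2])
def typeArray (arr : List Int) (n : Int) : Option (Int × Int) :=
  match PySem.List.max? arr (fun x => x), PySem.List.min? arr (fun x => x),
        PySem.List.pyGet? arr (n - 1), PySem.List.pyGet? arr 0 with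
  | some maxN, some minN, some lastN, some firstN =>
    if maxN = lastN ∧ minN = firstN then some (maxN, 1)
    else if maxN = firstN ∧ minN = lastN then some (maxN, 2)
    else
      match PySem.List.pyGet? (PySem.List.sorted arr (fun x => x) false) (-2) with
      | some sec2 =>
        if firstN = sec2 then some (maxN, 3)
        else typeArrayLoop arr maxN minN sec2 (PySem.List.pyRange 0 (n - 1) 1)
      | none => none
  | _, _, _, _ => none

-- ===== PORT B =====
-- one step of B's single pass: state is (mn, mx, second), all Optional
def typeArrayStep (st : Option Int × Option Int × Option Int) (v : Int) :
    Option Int × Option Int × Option Int :=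
  let mn' : Option Int :=
    match st.1 with
    | none => some v
    | some m => if v < m then some v else some m
  match st.2.1 with
  | none => (mn', some v, st.2.1)
  | some m =>
    if m ≤ v then (mn', some v, some m)
    else
      match st.2.2 with
      | none => (mn', some m, some v)
      | some s => if s < v then (mn', some m, some v) else (mn', some m, some s)

-- B's prev/cur scan over 'for i in range(1, n)'
def typeArrayScan (arr : List Int) (mx mn : Int) (sec? : Option Int) :
    Int → List Int → Option (Int × Int)
  | _, [] => none
  | prev, i :: rest =>
    match PySem.List.pyGet? arr i with
    | some cur =>
      if prev = mx then
        if some cur = sec? then some (mx, 3)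
        else if cur = mn then some (mx, 4)
        else typeArrayScan arr mx mn sec? cur rest
      else typeArrayScan arr mx mn sec? cur rest
    | none => none

def typeArray_alt (arr : List Int) (n : Int) : Option (Int × Int) :=
  match arr.foldl typeArrayStep (none, none, none),
        PySem.List.pyGet? arr 0, PySem.List.pyGet? arr (n - 1) with
  | (some mn, some mx, sec?), some firstN, some lastN =>
    if mx = lastN ∧ mn = firstN then some (mx, 1)
    else if mx = firstN ∧ mn = lastN then some (mx, 2)
    else if sec? = some firstN then some (mx, 3)
    else typeArrayScan arr mx mn sec? firstN (PySem.List.pyRange 1 n 1)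
  | _, _, _ => none

-- ===== PRECONDITION & SPEC =====
-- Pre_ is exactly where the Python A returns: arr nonempty (max/min raise on []) and
-- arr[n-1] a valid Python index (n is documented as the array's length; other n in this
-- range still return and are kept inside Pre_).
def Pre_typeArray (arr : List Int) (n : Int) : Prop :=
  arr ≠ [] ∧ 1 - (arr.length : Int) ≤ n ∧ n ≤ (arr.length : Int)
instance (arr : List Int) (n : Int) : Decidable (Pre_typeArray arr n) := by
  unfold Pre_typeArray; infer_instance

def pvWitness_typeArray : List Int × Int := ([2, 5, 1, 3], 4)

def Spec_typeArray (arr : List Int) (n : Int) (out : Option (Int × Int)) : Prop := out = typeArray_alt arr n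
instance (arr : List Int) (n : Int) (out : Option (Int × Int)) : Decidable (Spec_typeArray arr n out) := by unfold Spec_typeArray; infer_instance

-- ===== CLAIM (what is proved, stated in full; the proofs are below) =====
def Claim_equal_typeArray : Prop := ∀ (arr : List Int) (n : Int), Dom_typeArray arr n → Pre_typeArray arr n → Spec_typeArray arr n (typeArray arr n)

-- ===== LEMMAS AND PROOFS =====

-- abbreviation used only in the proofs: insertion into a sorted list (PySem's sort step)
def pvIns (v : Int) (s : List Int) : List Int :=
  PySem.List.insertBy (fun a b => decide (a < b)) v s

-- insertion below the last element happens inside the dropLast part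
theorem pvIns_split (v : Int) (s : List Int) (hne : s ≠ []) (hv : v < s.getLast hne) :
    pvIns v s = pvIns v s.dropLast ++ [s.getLast hne] := by
  induction s with
  | nil => exact absurd rfl hne
  | cons x t ih =>
    cases t with
    | nil =>
      simp only [List.getLast_singleton] at hv
      simp [pvIns, PySem.List.insertBy, hv]
    | cons y u =>
      have htne : (y :: u : List Int) ≠ [] := by simp
      have hlast : (x :: y :: u).getLast (by simp) = (y :: u).getLast htne := by
        simp [List.getLast_cons]
      rw [hlast] at hv
      by_cases hx : v < x
      · have : pvIns v (x :: y :: u) = v :: x :: y :: u := by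
          simp [pvIns, PySem.List.insertBy, hx]
        rw [this]
        have : pvIns v ((x :: y :: u).dropLast) = v :: (x :: y :: u).dropLast := by
          have : (x :: y :: u).dropLast = x :: (y :: u).dropLast := by simp
          rw [this]
          simp [pvIns, PySem.List.insertBy, hx]
        rw [this, List.cons_append, List.dropLast_append_getLast]
      · have h1 : pvIns v (x :: y :: u) = x :: pvIns v (y :: u) := by
          simp [pvIns, PySem.List.insertBy, hx]
        have h2 : (x :: y :: u).dropLast = x :: (y :: u).dropLast := by simp
        have h3 : pvIns v (x :: (y :: u).dropLast) = x :: pvIns v ((y :: u).dropLast) := by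
          simp [pvIns, PySem.List.insertBy, hx]
        rw [h1, h2, h3, hlast, List.cons_append, ih htne hv]

-- inserting an element ≥ everything appends it at the end
theorem pvIns_of_forall_le (v : Int) (s : List Int) (h : ∀ y ∈ s, y ≤ v) :
    pvIns v s = s ++ [v] := by
  refine PySem.List.insertBy_of_forall_not_before _ v s (fun y hy => ?_)
  simpa using h y hy

-- last element of a ≤-sorted list bounds every member
theorem pvLast_isMax (s : List Int) (hne : s ≠ []) (hp : s.Pairwise (· ≤ ·)) :
    ∀ y ∈ s, y ≤ s.getLast hne := by
  intro y hy
  exact hp.rel_getLast hy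

-- the fold state reached from a sorted prefix, projected
def pvProj (s : List Int) : Option Int × Option Int × Option Int :=
  (s.head?, s.getLast?, s.dropLast.getLast?)

-- last element of an insertion result
theorem pvIns_getLast? (v : Int) (s : List Int) (hp : s.Pairwise (· ≤ ·)) :
    (pvIns v s).getLast? = some (max v (s.getLast?.getD v)) := by
  cases s with
  | nil => simp [pvIns, PySem.List.insertBy]
  | cons x t =>
    have hne : (x :: t : List Int) ≠ [] := by simp
    have hLget : (x :: t).getLast? = some ((x :: t).getLast hne) :=
      List.getLast?_eq_some_getLast hne
    by_cases hv : v < (x :: t).getLast hne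
    · rw [pvIns_split v _ hne hv, List.getLast?_concat, hLget]
      simp [le_of_lt hv]
    · rw [not_lt] at hv
      rw [pvIns_of_forall_le v _ (fun y hy => le_trans (pvLast_isMax _ hne hp y hy) hv),
        List.getLast?_concat, hLget]
      simp [max_eq_left hv]

-- the key single-step fact: B's step applied to the projection of a sorted list
-- is the projection of the list with v inserted
theorem pvStep_proj (v : Int) (s : List Int) (hp : s.Pairwise (· ≤ ·)) :
    typeArrayStep (pvProj s) v = pvProj (pvIns v s) := by
  cases s with
  | nil => simp [pvProj, pvIns, PySem.List.insertBy, typeArrayStep]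
  | cons x t =>
    have hne : (x :: t : List Int) ≠ [] := by simp
    have hLget : (x :: t).getLast? = some ((x :: t).getLast hne) :=
      List.getLast?_eq_some_getLast hne
    by_cases hv : (x :: t).getLast hne ≤ v
    · -- insertion at the very end: ins v s = s ++ [v]
      have hall : ∀ y ∈ (x :: t), y ≤ v :=
        fun y hy => le_trans (pvLast_isMax _ hne hp y hy) hv
      have hins : pvIns v (x :: t) = (x :: t) ++ [v] := pvIns_of_forall_le v _ hall
      have hhead : v < x → False := fun h =>
        absurd (hall x (by simp)) (not_le.mpr h)
      simp only [pvProj, typeArrayStep, hins, hLget, List.head?_cons]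
      simp only [List.getLast?_concat, List.dropLast_concat, hLget]
      have hx : ¬ v < x := fun h => hhead h
      simp [hx, hv]
    · rw [not_le] at hv
      -- insertion strictly before the last element
      have hins : pvIns v (x :: t) = pvIns v (x :: t).dropLast ++ [(x :: t).getLast hne] :=
        pvIns_split v _ hne hv
      have hdrop : (pvIns v (x :: t)).dropLast = pvIns v (x :: t).dropLast := by
        rw [hins, List.dropLast_concat]
      have hlast : (pvIns v (x :: t)).getLast? = some ((x :: t).getLast hne) := by
        rw [hins, List.getLast?_concat]
      have hpd : ((x :: t).dropLast).Pairwise (· ≤ ·) :=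
        hp.sublist (List.dropLast_sublist (x :: t))
      have hmid : (pvIns v (x :: t).dropLast).getLast? =
          some (max v (((x :: t).dropLast).getLast?.getD v)) :=
        pvIns_getLast? v _ hpd
      -- head of the insertion result
      have hheadins : (pvIns v (x :: t)).head? = if v < x then some v else some x := by
        by_cases hx : v < x
        · simp [pvIns, PySem.List.insertBy, hx]
        · simp [pvIns, PySem.List.insertBy, hx]
      simp only [pvProj, typeArrayStep, List.head?_cons, hLget, hlast, hdrop, hmid,
        hheadins, not_le.mpr hv]
      cases hd : ((x :: t).dropLast).getLast? with
      | none => simp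
      | some s2 =>
        by_cases hs2 : s2 < v
        · simp [hs2, le_of_lt hs2]
        · rw [not_lt] at hs2
          simp [not_lt.mpr hs2, hs2]

-- the fold over any list lands on the projection of its sorted version
theorem pvFold_proj (l p : List Int) :
    l.foldl typeArrayStep (pvProj (PySem.List.sorted p (fun x => x) false)) =
      pvProj (PySem.List.sorted (p ++ l) (fun x => x) false) := by
  induction l generalizing p with
  | nil => simp
  | cons v l ih =>
    have hsort : PySem.List.sorted (p ++ [v]) (fun x => x) false =
        pvIns v (PySem.List.sorted p (fun x => x) false) := by
      rw [PySem.List.sorted_eq_foldl_insertBy, PySem.List.sorted_eq_foldl_insertBy,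
        List.foldl_append]
      rfl
    have hstep : typeArrayStep (pvProj (PySem.List.sorted p (fun x => x) false)) v =
        pvProj (PySem.List.sorted (p ++ [v]) (fun x => x) false) := by
      rw [hsort]
      exact pvStep_proj v _ (PySem.List.sorted_pairwise p (fun x => x))
    calc (v :: l).foldl typeArrayStep (pvProj (PySem.List.sorted p (fun x => x) false))
        = l.foldl typeArrayStep (pvProj (PySem.List.sorted (p ++ [v]) (fun x => x) false)) := by
          rw [List.foldl_cons, hstep]
      _ = pvProj (PySem.List.sorted ((p ++ [v]) ++ l) (fun x => x) false) := ih (p ++ [v])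
      _ = pvProj (PySem.List.sorted (p ++ v :: l) (fun x => x) false) := by
          simp

theorem pvFold_eq (arr : List Int) :
    arr.foldl typeArrayStep (none, none, none) =
      pvProj (PySem.List.sorted arr (fun x => x) false) := by
  have h0 : pvProj (PySem.List.sorted ([] : List Int) (fun x => x) false) =
      (none, none, none) := by rfl
  have := pvFold_proj arr []
  rw [h0] at this
  simpa using this

-- A's max over arr is the last element of the sorted list
theorem pvMax_eq_sortedLast (arr : List Int) (hne : arr ≠ []) :
    PySem.List.max? arr (fun x => x) =
      (PySem.List.sorted arr (fun x => x) false).getLast? := by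
  have hsne : PySem.List.sorted arr (fun x => x) false ≠ [] := by
    simpa [PySem.List.sorted_eq_nil_iff] using hne
  obtain ⟨m, hm⟩ : ∃ m, PySem.List.max? arr (fun x => x) = some m := by
    cases h : PySem.List.max? arr (fun x => x) with
    | none => exact absurd ((PySem.List.max?_eq_none_iff arr _).mp h) hne
    | some m => exact ⟨m, rfl⟩
  set L := (PySem.List.sorted arr (fun x => x) false).getLast hsne with hLdef
  have hLget : (PySem.List.sorted arr (fun x => x) false).getLast? = some L :=
    List.getLast?_eq_some_getLast hsne
  have hLmem : L ∈ arr := by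
    rw [← PySem.List.mem_sorted arr (fun x => x) false]
    exact List.getLast_mem hsne
  have h1 : L ≤ m := PySem.List.max?_isMax hm L hLmem
  have h2 : m ≤ L := by
    have hmmem : m ∈ PySem.List.sorted arr (fun x => x) false :=
      (PySem.List.mem_sorted arr (fun x => x) false m).mpr (PySem.List.max?_mem hm)
    exact pvLast_isMax _ hsne (PySem.List.sorted_pairwise arr (fun x => x)) m hmmem
  rw [hm, hLget, le_antisymm h2 h1]

-- A's min over arr is the head of the sorted list
theorem pvMin_eq_sortedHead (arr : List Int) (hne : arr ≠ []) :
    PySem.List.min? arr (fun x => x) =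
      (PySem.List.sorted arr (fun x => x) false).head? := by
  have hsne : PySem.List.sorted arr (fun x => x) false ≠ [] := by
    simpa [PySem.List.sorted_eq_nil_iff] using hne
  obtain ⟨m, hm⟩ : ∃ m, PySem.List.min? arr (fun x => x) = some m := by
    cases h : PySem.List.min? arr (fun x => x) with
    | none => exact absurd ((PySem.List.min?_eq_none_iff arr _).mp h) hne
    | some m => exact ⟨m, rfl⟩
  obtain ⟨H, t, hcons⟩ : ∃ H t, PySem.List.sorted arr (fun x => x) false = H :: t := by
    cases h : PySem.List.sorted arr (fun x => x) false with
    | nil => exact absurd h (by simpa [PySem.List.sorted_eq_nil_iff] using hne)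
    | cons H t => exact ⟨H, t, rfl⟩
  have hHmem : H ∈ arr := by
    rw [← PySem.List.mem_sorted arr (fun x => x) false, hcons]; simp
  have h1 : m ≤ H := PySem.List.min?_isMin hm H hHmem
  have h2 : H ≤ m := PySem.List.key_head_sorted_le arr (fun x => x) hcons m
    (PySem.List.min?_mem hm)
  rw [hm, hcons, List.head?_cons, le_antisymm h2 h1]

-- sortArr[-2] is the last element of dropLast, for length ≥ 2
theorem pvSorted_neg2 (s : List Int) (h2 : 2 ≤ s.length) :
    PySem.List.pyGet? s (-2) = s.dropLast.getLast? := by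
  rw [PySem.List.pyGet?_neg_ofNat s 2 (by omega) h2]
  rw [List.getLast?_eq_getElem?, List.getElem?_dropLast]
  have : s.dropLast.length = s.length - 1 := by simp
  rw [this]
  have h : s.length - 1 - 1 = s.length - 2 := by omega
  rw [h, if_pos (by omega)]

-- A's index loop from k and B's prev/cur scan from k+1 coincide
theorem pvLoop_eq_scan (arr : List Int) (n : Int) (mx mn s2 : Int)
    (hn : n ≤ (arr.length : Int)) :
    ∀ (fuel : Nat) (k : Int) (pk : Int), 0 ≤ k → fuel = (n - 1 - k).toNat →
      PySem.List.pyGet? arr k = some pk →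
      typeArrayLoop arr mx mn s2 (PySem.List.pyRange k (n - 1) 1) =
        typeArrayScan arr mx mn (some s2) pk (PySem.List.pyRange (k + 1) n 1) := by
  intro fuel
  induction fuel with
  | zero =>
    intro k pk hk hfuel _
    have hk1 : n - 1 ≤ k := by omega
    rw [PySem.List.pyRange_one_eq_nil (a := k) (b := n - 1) hk1,
      PySem.List.pyRange_one_eq_nil (a := k + 1) (b := n) (by omega)]
    rfl
  | succ m ih =>
    intro k pk hk hfuel hpk
    by_cases hklt : k < n - 1
    · obtain ⟨cur, hget⟩ : ∃ c, PySem.List.pyGet? arr (k + 1) = some c :=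
        ⟨_, PySem.List.pyGet?_eq_some_getElem arr (by omega) (by omega)⟩
      have hrec := ih (k + 1) cur (by omega) (by omega) hget
      rw [PySem.List.pyRange_one_cons hklt,
        PySem.List.pyRange_one_cons (a := k + 1) (b := n) (by omega)]
      simp only [typeArrayLoop, typeArrayScan, hpk, hget, Option.some.injEq]
      rw [hrec]
    · rw [PySem.List.pyRange_one_eq_nil (a := k) (b := n - 1) (by omega),
        PySem.List.pyRange_one_eq_nil (a := k + 1) (b := n) (by omega)]
      rfl

-- ===== VERDICT (by name: the statement is the Claim_ definition above) =====
theorem typeArray_spec : Claim_equal_typeArray := by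
  intro arr n _ hpre
  obtain ⟨hne, hlo, hhi⟩ := hpre
  unfold Spec_typeArray
  have hlen1 : 0 < arr.length := List.length_pos_of_ne_nil hne
  have hsne : PySem.List.sorted arr (fun x => x) false ≠ [] := by
    simpa [PySem.List.sorted_eq_nil_iff] using hne
  have hmax : PySem.List.max? arr (fun x => x) =
      some ((PySem.List.sorted arr (fun x => x) false).getLast hsne) := by
    rw [pvMax_eq_sortedLast arr hne, List.getLast?_eq_some_getLast hsne]
  have hmin : PySem.List.min? arr (fun x => x) =
      some ((PySem.List.sorted arr (fun x => x) false).head hsne) := by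
    rw [pvMin_eq_sortedHead arr hne, List.head?_eq_some_head hsne]
  have hfold : arr.foldl typeArrayStep (none, none, none) =
      (some ((PySem.List.sorted arr (fun x => x) false).head hsne),
       some ((PySem.List.sorted arr (fun x => x) false).getLast hsne),
       (PySem.List.sorted arr (fun x => x) false).dropLast.getLast?) := by
    rw [pvFold_eq arr]
    unfold pvProj
    rw [List.head?_eq_some_head hsne, List.getLast?_eq_some_getLast hsne]
  obtain ⟨F, hF⟩ : ∃ c, PySem.List.pyGet? arr 0 = some c :=
    ⟨_, PySem.List.pyGet?_eq_some_getElem arr le_rfl (by exact_mod_cast hlen1)⟩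
  obtain ⟨Z, hZ⟩ : ∃ c, PySem.List.pyGet? arr (n - 1) = some c := by
    cases h : PySem.List.pyGet? arr (n - 1) with
    | some c => exact ⟨c, rfl⟩
    | none =>
      rw [PySem.List.pyGet?_eq_none_iff] at h
      exact absurd ⟨by omega, by omega⟩ h
  simp only [typeArray, typeArray_alt, hmax, hmin, hfold, hF, hZ]
  by_cases hc1 : (PySem.List.sorted arr (fun x => x) false).getLast hsne = Z ∧
      (PySem.List.sorted arr (fun x => x) false).head hsne = F
  · simp [hc1]
  · by_cases hc2 : (PySem.List.sorted arr (fun x => x) false).getLast hsne = F ∧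
        (PySem.List.sorted arr (fun x => x) false).head hsne = Z
    · simp [hc2]
    · -- third branch: here the list must have at least two elements
      have hlen2 : 2 ≤ arr.length := by
        by_contra hlen
        have h1 : arr.length = 1 := by omega
        obtain ⟨x, rfl⟩ := List.length_eq_one_iff.mp h1
        have hFx : F = x := by
          have := PySem.List.mem_of_pyGet?_eq_some [x] hF; simpa using this
        have hZx : Z = x := by
          have := PySem.List.mem_of_pyGet?_eq_some [x] hZ; simpa using this
        have hLx : (PySem.List.sorted [x] (fun x => x) false).getLast hsne = x := by
          have hm : (PySem.List.sorted [x] (fun x => x) false).getLast hsne ∈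
              PySem.List.sorted [x] (fun x => x) false := List.getLast_mem hsne
          rw [PySem.List.mem_sorted] at hm; simpa using hm
        have hHx : (PySem.List.sorted [x] (fun x => x) false).head hsne = x := by
          have hm : (PySem.List.sorted [x] (fun x => x) false).head hsne ∈
              PySem.List.sorted [x] (fun x => x) false := List.head_mem hsne
          rw [PySem.List.mem_sorted] at hm; simpa using hm
        exact hc1 ⟨by rw [hLx, hZx], by rw [hHx, hFx]⟩
      have hs2 : 2 ≤ (PySem.List.sorted arr (fun x => x) false).length := by
        rw [PySem.List.length_sorted]; exact hlen2
      have hdne : (PySem.List.sorted arr (fun x => x) false).dropLast ≠ [] := by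
        have hdl : (PySem.List.sorted arr (fun x => x) false).dropLast.length =
            (PySem.List.sorted arr (fun x => x) false).length - 1 := by simp
        intro h
        rw [h] at hdl
        simp at hdl
        omega
      have hD : (PySem.List.sorted arr (fun x => x) false).dropLast.getLast? =
          some ((PySem.List.sorted arr (fun x => x) false).dropLast.getLast hdne) :=
        List.getLast?_eq_some_getLast hdne
      have hneg2 : PySem.List.pyGet? (PySem.List.sorted arr (fun x => x) false) (-2) =
          some ((PySem.List.sorted arr (fun x => x) false).dropLast.getLast hdne) := by
        rw [pvSorted_neg2 _ hs2, hD]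
      simp only [hc1, hc2, if_false, hneg2, hD]
      by_cases hFS : F = (PySem.List.sorted arr (fun x => x) false).dropLast.getLast hdne
      · simp [hFS]
      · have hloop := pvLoop_eq_scan arr n
          ((PySem.List.sorted arr (fun x => x) false).getLast hsne)
          ((PySem.List.sorted arr (fun x => x) false).head hsne)
          ((PySem.List.sorted arr (fun x => x) false).dropLast.getLast hdne)
          (by omega) (n - 1).toNat 0 F le_rfl (by omega) hF
        simp only [zero_add] at hloop
        simp [hFS, Ne.symm hFS, hloop]
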